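-- pv_equiv track=rewrite | github.com/kginn/Wordle | Wordle/wordle_solver.py | word_score
-- ===== SOURCE A (Python) =====
-- def word_letter_count(word, letter):
--     '''
--     counts the number of the letter in the word
--     '''
--     l_count = 0
--     x = -1
--     for l in word:
--         x += 1
--         if word[x] == letter:
--             l_count += 1
--
--     return l_count
--
-- def word_dict(w_list):
--     '''
--     puts the words in the list into a dictionary
--     '''
--     w_dict = {}
--
--     for w in w_list:
--         w_dict.update({w : 0})
--
--     return w_dict
--
-- def word_score(w_list, l_dict):
--     '''
--     gives a score for each word in the list
--     '''
--     score_dict = word_dict(w_list)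
--
--     x = -1
--     for word in w_list:
--         for i in range(5):
--             x += 1
--             for l in word:
--                 score_dict[word] += l_dict[l]
--
--                 if word_letter_count(word, l) > 1:
--                     count = word_letter_count(word, l) - 1
--                     for i in range(count):
--                         score_dict[word] -= l_dict[l]
--
--     n_score = sorted(score_dict.items(), key = lambda x: x[1], reverse = True)
--
--     return n_score
-- ===== SOURCE B (Python) =====
-- def word_score(w_list, l_dict):
--     '''
--     gives a score for each word in the list
--     '''
--     score_dict = {w: 0 for w in w_list}
--
--     for word in w_list:
--         counts = {}
--         for l in word:
--             counts[l] = counts.get(l, 0) + 1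
--         score_dict[word] += 5 * sum(c * (2 - c) * l_dict[l] for l, c in counts.items())
--
--     return sorted(score_dict.items(), key=lambda x: x[1], reverse=True)
-- ===== Notes on version B (the rewrite author's own statement) =====
-- stated objective: faster
-- what changed: Replaces A's 5x-repeated triple-nested rescan (word_letter_count recomputed per letter plus an explicit subtraction loop) by one counting pass per word and the closed-form increment 5 * sum(c*(2-c)*l_dict[l]) over the word's distinct letters.
import Mathlib
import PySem

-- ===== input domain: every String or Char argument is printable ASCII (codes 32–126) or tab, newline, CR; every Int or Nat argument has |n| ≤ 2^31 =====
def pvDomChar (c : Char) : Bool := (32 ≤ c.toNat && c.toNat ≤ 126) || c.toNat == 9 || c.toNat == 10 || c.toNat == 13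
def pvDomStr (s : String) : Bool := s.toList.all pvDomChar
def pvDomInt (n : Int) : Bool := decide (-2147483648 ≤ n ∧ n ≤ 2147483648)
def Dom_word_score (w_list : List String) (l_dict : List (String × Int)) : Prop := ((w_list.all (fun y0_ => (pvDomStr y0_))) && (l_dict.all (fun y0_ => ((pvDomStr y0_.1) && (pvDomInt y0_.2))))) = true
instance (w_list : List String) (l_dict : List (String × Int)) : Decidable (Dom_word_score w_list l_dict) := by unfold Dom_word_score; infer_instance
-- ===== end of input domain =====

-- B replaces A's 5×-repeated nested rescans per letter by one counting pass per word
-- and the closed-form increment 5 * Σ c*(2-c)*l_dict[l]; objective: faster.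

-- ===== PORT A =====
-- literal port of word_letter_count: walks an index x alongside the chars, testing word[x]
def word_letter_count (word : String) (letter : Char) : Int :=
  (word.toList.foldl (fun (st : Int × Int) _ =>
      let x := st.2 + 1
      let l_count := if PySem.Str.pyGet? word x = some letter then st.1 + 1 else st.1
      (l_count, x)) (0, -1)).1

-- literal port of word_dict: w_dict.update({w : 0}) inserts w with value 0
def word_dict (w_list : List String) : PySem.Dict String Int :=
  w_list.foldl (fun d w => d.insert w 0) PySem.Dict.empty

def word_score (w_list : List String) (l_dict : List (String × Int)) : List (String × Int) :=
  let ld := PySem.Dict.mk l_dict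
  let score_dict := word_dict w_list
  let score_dict := w_list.foldl (fun d word =>
    (PySem.List.pyRange 0 5 1).foldl (fun d _ =>
      word.toList.foldl (fun d l =>
        let v := ld.getD (String.singleton l) 0
        let d := d.modify word 0 (· + v)
        if word_letter_count word l > 1 then
          let count := word_letter_count word l - 1
          (PySem.List.pyRange 0 count 1).foldl (fun d _ => d.modify word 0 (· - v)) d
        else d) d) d) score_dict
  PySem.List.sorted score_dict.items (fun x => x.2) true

-- ===== PORT B =====
def word_score_alt (w_list : List String) (l_dict : List (String × Int)) : List (String × Int) :=
  let ld := PySem.Dict.mk l_dict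
  let score_dict := w_list.foldl (fun (d : PySem.Dict String Int) w => d.insert w 0) PySem.Dict.empty
  let score_dict := w_list.foldl (fun d word =>
    let counts := word.toList.foldl (fun (c : PySem.Dict Char Int) l => c.insert l (c.getD l 0 + 1)) PySem.Dict.empty
    d.modify word 0 (· + 5 * (counts.items.map (fun p => p.2 * (2 - p.2) * ld.getD (String.singleton p.1) 0)).sum)) score_dict
  PySem.List.sorted score_dict.items (fun x => x.2) true

-- ===== PRECONDITION & SPEC =====
-- Pre_ excludes exactly the inputs where Python A raises KeyError: some word contains a
-- letter that is not a key of l_dict (B raises the same KeyError there).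
def Pre_word_score (w_list : List String) (l_dict : List (String × Int)) : Prop :=
  (w_list.all (fun w => w.toList.all (fun c => l_dict.any (fun p => p.1.toList == [c])))) = true
instance (w_list : List String) (l_dict : List (String × Int)) : Decidable (Pre_word_score w_list l_dict) := by unfold Pre_word_score; infer_instance

def pvWitness_word_score : List String × (List (String × Int)) := (["ab", "a"], [("a", 3), ("b", -1)])

def Spec_word_score (w_list : List String) (l_dict : List (String × Int)) (out : List (String × Int)) : Prop := out = word_score_alt w_list l_dict
instance (w_list : List String) (l_dict : List (String × Int)) (out : List (String × Int)) : Decidable (Spec_word_score w_list l_dict out) := by unfold Spec_word_score; infer_instance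

-- ===== CLAIM (what is proved, stated in full; the proofs are below) =====
def Claim_equal_word_score : Prop := ∀ (w_list : List String) (l_dict : List (String × Int)), Dom_word_score w_list l_dict → Pre_word_score w_list l_dict → Spec_word_score w_list l_dict (word_score w_list l_dict)

-- ===== LEMMAS AND PROOFS =====

-- word_letter_count counts occurrences: the index x always points at the iterated char
lemma wlc_aux (word : String) (letter : Char) :
    ∀ (rest : List Char) (n : Nat) (acc : Int), word.toList.drop n = rest →
    (rest.foldl (fun (st : Int × Int) _ =>
        let x := st.2 + 1
        let l_count := if PySem.Str.pyGet? word x = some letter then st.1 + 1 else st.1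
        (l_count, x)) (acc, (n : Int) - 1)).1 = acc + rest.count letter := by
  intro rest
  induction rest with
  | nil => intro n acc _; simp
  | cons c t ih =>
    intro n acc hdrop
    have hn : n < word.toList.length := by
      by_contra h
      simp [List.drop_eq_nil_of_le (by omega : word.toList.length ≤ n)] at hdrop
    have hget : word.toList[n]? = some c := by
      have h0 : (word.toList.drop n)[0]? = word.toList[n + 0]? := List.getElem?_drop
      rw [hdrop] at h0
      simpa using h0.symm
    have hstep : PySem.Str.pyGet? word ((n : Int) - 1 + 1) = some c := by
      have h1 : (n : Int) - 1 + 1 = (n : Int) := by ring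
      rw [h1]
      simp [PySem.Str.pyGet?, pysem, hget]
    have hdrop' : word.toList.drop (n + 1) = t := by
      have := congrArg (List.drop 1) hdrop
      simpa [List.drop_drop, Nat.add_comm] using this
    have hidx : (n : Int) - 1 + 1 = ((n + 1 : Nat) : Int) - 1 := by push_cast; ring
    simp only [List.foldl_cons, hstep]
    rw [hidx]
    by_cases hc : c = letter
    · rw [if_pos (by rw [hc])]
      rw [ih (n + 1) (acc + 1) hdrop']
      simp [hc]
      ring
    · rw [if_neg (fun h => hc (Option.some.inj h))]
      rw [ih (n + 1) acc hdrop']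
      simp [List.count_cons]
      exact hc

lemma wlc_eq_count (word : String) (letter : Char) :
    word_letter_count word letter = (word.toList.count letter : Int) := by
  have := wlc_aux word letter word.toList 0 0 (by simp)
  simpa [word_letter_count] using this

-- modify at key k with default 0 is an insert (definitional)
lemma modify_eq_insert (d : PySem.Dict String Int) (k : String) (f : Int → Int) :
    d.modify k 0 f = d.insert k (f (d.getD k 0)) := rfl

lemma modify_comp (d : PySem.Dict String Int) (k : String) (f g : Int → Int) :
    (d.modify k 0 f).modify k 0 g = d.modify k 0 (fun x => g (f x)) := by
  rw [modify_eq_insert, modify_eq_insert, modify_eq_insert,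
    PySem.Dict.getD_insert_self, PySem.Dict.insert_insert_self]

lemma modify_add_zero (d : PySem.Dict String Int) (k : String)
    (hnd : d.keys.Nodup) (hc : d.contains k = true) : d.modify k 0 (· + 0) = d := by
  rw [modify_eq_insert]
  apply PySem.Dict.ext
  rw [PySem.Dict.items_insert_of_contains _ _ hc]
  have hpt : ∀ p ∈ d.items, (if p.1 == k then (k, d.getD k 0 + 0) else p) = p := by
    intro p hp
    by_cases h : p.1 = k
    · have hv : d.getD k 0 = p.2 := by
        rw [← h]
        exact PySem.Dict.getD_of_mem_items _ (by simpa using hp) hnd 0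
      rw [if_pos (by simp [h]), hv, add_zero, ← h]
    · simp [h]
  rw [List.map_congr_left hpt]
  simp

-- a run of length-many subtractions at an anchored key
lemma foldl_modify_sub (L : List Int) (d : PySem.Dict String Int) (k : String) (v a : Int) :
    L.foldl (fun d _ => PySem.Dict.modify d k 0 (· - v)) (d.modify k 0 (· + a))
      = d.modify k 0 (· + (a - L.length * v)) := by
  induction L generalizing a with
  | nil => simp
  | cons x t ih =>
    simp only [List.foldl_cons]
    rw [modify_comp]
    have h1 : (fun x => x + a - v) = (fun x => x + (a - v)) := by funext y; ring
    rw [h1, ih]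
    congr 1
    funext y
    simp only [List.length_cons]
    push_cast
    ring

-- A's per-word inner letter loop, anchored at the word's key
lemma fold_letters (ld : PySem.Dict String Int) (word : String) :
    ∀ (L : List Char) (d : PySem.Dict String Int) (a : Int), (∀ l ∈ L, l ∈ word.toList) →
    L.foldl (fun d l =>
        let v := ld.getD (String.singleton l) 0
        let d := PySem.Dict.modify d word 0 (· + v)
        if word_letter_count word l > 1 then
          let count := word_letter_count word l - 1
          (PySem.List.pyRange 0 count 1).foldl (fun d _ => PySem.Dict.modify d word 0 (· - v)) d
        else d) (d.modify word 0 (· + a))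
      = d.modify word 0 (· + (a + (L.map (fun l =>
          (2 - (word.toList.count l : Int)) * ld.getD (String.singleton l) 0)).sum)) := by
  intro L
  induction L with
  | nil => intro d a _; simp
  | cons c t ih =>
    intro d a hmem
    have hc : c ∈ word.toList := hmem c (by simp)
    have hcnt1 : 1 ≤ word.toList.count c := List.one_le_count_iff.mpr hc
    simp only [List.foldl_cons]
    set v := ld.getD (String.singleton c) 0 with hv
    rw [wlc_eq_count]
    by_cases hbig : (word.toList.count c : Int) > 1
    · rw [if_pos hbig, modify_comp]
      have h1 : (fun x => x + a + v) = (fun x => x + (a + v)) := by funext y; ring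
      rw [h1, foldl_modify_sub]
      have hlen : ((PySem.List.pyRange 0 ((word.toList.count c : Int) - 1) 1).length : Int)
          = (word.toList.count c : Int) - 1 := by
        rw [PySem.List.length_pyRange_one]; omega
      rw [ih _ _ (fun l hl => hmem l (by simp [hl]))]
      congr 1
      funext y
      rw [hlen]
      simp only [List.map_cons, List.sum_cons]
      ring
    · rw [if_neg hbig]
      have hone : (word.toList.count c : Int) = 1 := by omega
      rw [modify_comp]
      have h1 : (fun x => x + a + v) = (fun x => x + (a + v)) := by funext y; ring
      rw [h1, ih _ _ (fun l hl => hmem l (by simp [hl]))]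
      congr 1
      funext y
      simp only [List.map_cons, List.sum_cons, hone]
      ring

-- the per-occurrence sum over a word's letters, regrouped over its distinct letters
lemma sum_group (xs : List Char) (v : Char → Int) :
    (xs.map (fun l => (2 - (xs.count l : Int)) * v l)).sum
      = ((PySem.Set.ofList xs).map (fun k =>
          (xs.count k : Int) * (2 - (xs.count k : Int)) * v k)).sum := by
  rw [Finset.sum_list_map_count, Finset.sum_list_map_count]
  have htf : (PySem.Set.ofList xs).toFinset = xs.toFinset := by
    apply Finset.ext
    intro a
    simp [List.mem_toFinset, PySem.Set.mem_ofList]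
  rw [htf]
  apply Finset.sum_congr rfl
  intro m hm
  have hmem : m ∈ xs := List.mem_toFinset.mp hm
  have hone : (PySem.Set.ofList xs).count m = 1 :=
    List.count_eq_one_of_mem (PySem.Set.nodup_ofList xs) ((PySem.Set.mem_ofList xs m).mpr hmem)
  rw [hone, one_smul, nsmul_eq_mul]
  ring

-- A's whole per-word action equals B's single closed-form modify
lemma step_eq (ld : PySem.Dict String Int) (word : String) (d : PySem.Dict String Int)
    (hnd : d.keys.Nodup) (hc : d.contains word = true) :
    (PySem.List.pyRange 0 5 1).foldl (fun d _ =>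
      word.toList.foldl (fun d l =>
        let v := ld.getD (String.singleton l) 0
        let d := PySem.Dict.modify d word 0 (· + v)
        if word_letter_count word l > 1 then
          let count := word_letter_count word l - 1
          (PySem.List.pyRange 0 count 1).foldl (fun d _ => PySem.Dict.modify d word 0 (· - v)) d
        else d) d) d
    = d.modify word 0 (· + 5 * (((word.toList.foldl (fun (c : PySem.Dict Char Int) l =>
          c.insert l (c.getD l 0 + 1)) PySem.Dict.empty).items.map
            (fun p => p.2 * (2 - p.2) * ld.getD (String.singleton p.1) 0)).sum)) := by
  have hrange : PySem.List.pyRange 0 5 1 = [0, 1, 2, 3, 4] := by decide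
  rw [hrange]
  set S : Int := (word.toList.map (fun l =>
      (2 - (word.toList.count l : Int)) * ld.getD (String.singleton l) 0)).sum with hS
  have hself : ∀ l ∈ word.toList, l ∈ word.toList := fun _ h => h
  have h0 : d = d.modify word 0 (· + 0) := (modify_add_zero d word hnd hc).symm
  simp only [List.foldl_cons, List.foldl_nil]
  conv_lhs => rw [h0]
  rw [fold_letters ld word _ _ _ hself, fold_letters ld word _ _ _ hself,
    fold_letters ld word _ _ _ hself, fold_letters ld word _ _ _ hself,
    fold_letters ld word _ _ _ hself]
  rw [PySem.Dict.foldl_insert_getD_add_one_eq_counter word.toList,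
    PySem.Dict.items_counter word.toList]
  rw [List.map_map]
  have hsum : ((PySem.Set.ofList word.toList).map
      ((fun p : Char × Int => p.2 * (2 - p.2) * ld.getD (String.singleton p.1) 0) ∘
        fun k => (k, (word.toList.count k : Int)))).sum
      = ((PySem.Set.ofList word.toList).map (fun k =>
          (word.toList.count k : Int) * (2 - (word.toList.count k : Int)) *
            ld.getD (String.singleton k) 0)).sum := by
    congr 1
  rw [hsum, ← sum_group, ← hS]
  congr 1
  funext y
  ring

-- both outer folds produce the same dict, given every word is already a key
lemma outer_fold (ld : PySem.Dict String Int) (ws : List String) :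
    ∀ d : PySem.Dict String Int, d.keys.Nodup → (∀ w ∈ ws, d.contains w = true) →
    ws.foldl (fun d word =>
      (PySem.List.pyRange 0 5 1).foldl (fun d _ =>
        word.toList.foldl (fun d l =>
          let v := ld.getD (String.singleton l) 0
          let d := PySem.Dict.modify d word 0 (· + v)
          if word_letter_count word l > 1 then
            let count := word_letter_count word l - 1
            (PySem.List.pyRange 0 count 1).foldl (fun d _ => PySem.Dict.modify d word 0 (· - v)) d
          else d) d) d) d
    = ws.foldl (fun d word =>
        let counts := word.toList.foldl (fun (c : PySem.Dict Char Int) l => c.insert l (c.getD l 0 + 1)) PySem.Dict.empty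
        d.modify word 0 (· + 5 * (counts.items.map (fun p => p.2 * (2 - p.2) * ld.getD (String.singleton p.1) 0)).sum)) d := by
  induction ws with
  | nil => intro d _ _; rfl
  | cons w t ih =>
    intro d hnd hc
    simp only [List.foldl_cons]
    rw [step_eq ld w d hnd (hc w (by simp))]
    have hkeys : ∀ (f : Int → Int), (d.modify w 0 f).keys = d.keys := by
      intro f
      rw [modify_eq_insert, PySem.Dict.keys_insert_of_contains _ _ (hc w (by simp))]
    have hcont : ∀ w' ∈ t, ∀ (f : Int → Int), (d.modify w 0 f).contains w' = true := by
      intro w' hw' f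
      rw [PySem.Dict.contains_iff_mem_keys, hkeys]
      rw [← PySem.Dict.contains_iff_mem_keys]
      exact hc w' (by simp [hw'])
    exact ih _ (by rw [hkeys]; exact hnd) (fun w' hw' => hcont w' hw' _)

lemma score0_keys (ws : List String) :
    (ws.foldl (fun (d : PySem.Dict String Int) w => d.insert w 0) PySem.Dict.empty).keys
      = PySem.Set.ofList ws := by
  rw [PySem.Dict.keys_foldl_insert]
  simp [pysem]

-- ===== VERDICT (by name: the statement is the Claim_ definition above) =====
theorem word_score_spec : Claim_equal_word_score := by
  intro w_list l_dict _ _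
  simp only [Spec_word_score, word_score, word_score_alt, word_dict]
  have hnd : (w_list.foldl (fun (d : PySem.Dict String Int) w => d.insert w 0) PySem.Dict.empty).keys.Nodup := by
    rw [score0_keys]; exact PySem.Set.nodup_ofList w_list
  have hc : ∀ w ∈ w_list,
      (w_list.foldl (fun (d : PySem.Dict String Int) w => d.insert w 0) PySem.Dict.empty).contains w = true := by
    intro w hw
    rw [PySem.Dict.contains_iff_mem_keys, score0_keys]
    exact (PySem.Set.mem_ofList w_list w).mpr hw
  rw [outer_fold (PySem.Dict.mk l_dict) w_list _ hnd hc]
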